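-- pv_equiv track=rewrite | github.com/cirosantilli/project-euler-solutions | solvers/813.py | xor_pow
-- ===== SOURCE A (Python) =====
-- def xor_product(x: int, y: int) -> int:
--     """Carryless (XOR) product of nonnegative integers x and y."""
--     if x < 0 or y < 0:
--         raise ValueError("xor_product expects nonnegative integers")
--     res = 0
--     shift = 0
--     while y:
--         if y & 1:
--             res ^= x << shift
--         y >>= 1
--         shift += 1
--     return res
--
-- def xor_pow(base: int, exp: int) -> int:
--     """Exponentiation under xor_product (useful only for small exp in tests)."""
--     if exp < 0:
--         raise ValueError("exp must be nonnegative")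
--     result = 1  # multiplicative identity for ⊗
--     while exp:
--         if exp & 1:
--             result = xor_product(result, base)
--         base = xor_product(base, base)
--         exp >>= 1
--     return result
-- ===== SOURCE B (Python) =====
-- def xor_product(x: int, y: int) -> int:
--     """Carryless (XOR) product of nonnegative integers x and y."""
--     if x < 0 or y < 0:
--         raise ValueError("xor_product expects nonnegative integers")
--     res = 0
--     shift = 0
--     while y:
--         if y & 1:
--             res ^= x << shift
--         y >>= 1
--         shift += 1
--     return res
--
-- def xor_pow(base: int, exp: int) -> int:
--     """Exponentiation under xor_product: left-to-right binary method over bin(exp)."""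
--     if exp < 0:
--         raise ValueError("exp must be nonnegative")
--     result = 1
--     for bit in bin(exp)[2:]:
--         result = xor_product(result, result)
--         if bit == '1':
--             result = xor_product(result, base)
--     return result
-- ===== Notes on version B (the rewrite author's own statement) =====
-- stated objective: alternative
-- what changed: Replaced A's right-to-left square-and-multiply loop (which halves the exponent and repeatedly squares the base) with the left-to-right binary method: iterate over the bits of bin(exp) from the most significant end, squaring the accumulator each step and multiplying in the fixed base on a 1-bit.
import Mathlib
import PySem

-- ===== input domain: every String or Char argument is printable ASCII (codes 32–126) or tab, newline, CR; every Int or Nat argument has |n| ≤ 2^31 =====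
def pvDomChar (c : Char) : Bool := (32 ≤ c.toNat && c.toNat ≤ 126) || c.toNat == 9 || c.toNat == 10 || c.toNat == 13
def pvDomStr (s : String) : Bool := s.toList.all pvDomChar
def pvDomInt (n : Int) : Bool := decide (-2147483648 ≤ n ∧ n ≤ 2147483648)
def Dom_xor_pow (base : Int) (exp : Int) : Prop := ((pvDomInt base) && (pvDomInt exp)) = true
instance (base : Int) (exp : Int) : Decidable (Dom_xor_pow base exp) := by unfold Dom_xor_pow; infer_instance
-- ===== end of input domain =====

-- B replaces A's right-to-left square-the-base exponentiation loop by the left-to-right binary method over the bits of exp (squares the accumulator, multiplies in the fixed base on 1-bits).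


-- ===== PORT A =====
-- xor_product's while loop; inside Pre_ every Python value involved is a nonnegative int,
-- modelled as Nat.  `y &&& 1`, `y >>> 1`, `x <<< shift` are Python's `y & 1`, `y >> 1`, `x << shift`.
def xorProductLoop (x : Nat) (y : Nat) (res : Nat) (shift : Nat) : Nat :=
  if y = 0 then res
  else xorProductLoop x (y >>> 1) (if y &&& 1 = 1 then res ^^^ (x <<< shift) else res) (shift + 1)
decreasing_by simp [Nat.shiftRight_one]; omega

-- A's while loop: multiply on an odd bit, square the base, halve the exponent.
def xorPowLoop (base : Nat) (exp : Nat) (result : Nat) : Nat :=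
  if exp = 0 then result
  else xorPowLoop (xorProductLoop base base 0 0) (exp >>> 1)
        (if exp &&& 1 = 1 then xorProductLoop result base 0 0 else result)
decreasing_by simp [Nat.shiftRight_one]; omega

-- Python raises ValueError on exp < 0 and (via xor_product) on base < 0 with exp ≠ 0; those
-- inputs are excluded by Pre_ and the port returns a dummy value / an unused loop result there.
def xor_pow (base : Int) (exp : Int) : Int :=
  if exp < 0 then 0 else (xorPowLoop base.toNat exp.toNat 1 : Int)

-- ===== PORT B =====
-- binary digits of n, most significant first; Python's bin(n)[2:] ('0'/'1' chars ported as the digits 0/1)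
def natBits (n : Nat) : List Nat :=
  if n = 0 then [] else natBits (n / 2) ++ [n % 2]
decreasing_by omega

def pyBin (n : Nat) : List Nat := if n = 0 then [0] else natBits n

-- B's for-loop over the bits of bin(exp): square the accumulator, multiply in base on a 1-bit
-- (xor_product is A's unchanged helper, so B reuses its loop port xorProductLoop).
def xorPowAltLoop (base : Nat) (result : Nat) : List Nat → Nat
  | [] => result
  | bit :: rest =>
      xorPowAltLoop base
        (if bit = 1 then xorProductLoop (xorProductLoop result result 0 0) base 0 0
         else xorProductLoop result result 0 0) rest

def xor_pow_alt (base : Int) (exp : Int) : Int :=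
  if exp < 0 then 0 else (xorPowAltLoop base.toNat 1 (pyBin exp.toNat) : Int)

-- ===== PRECONDITION & SPEC =====
-- Pre_ excludes exactly the inputs where Python A raises ValueError: negative exp, and
-- negative base with exp ≠ 0 (xor_product rejects negative arguments); B raises there too.
def Pre_xor_pow (base : Int) (exp : Int) : Prop := 0 ≤ exp ∧ (0 ≤ base ∨ exp = 0)
instance (base : Int) (exp : Int) : Decidable (Pre_xor_pow base exp) := by unfold Pre_xor_pow; infer_instance
def pvWitness_xor_pow : Int × Int := (3, 5)

def Spec_xor_pow (base : Int) (exp : Int) (out : Int) : Prop := out = xor_pow_alt base exp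
instance (base : Int) (exp : Int) (out : Int) : Decidable (Spec_xor_pow base exp out) := by unfold Spec_xor_pow; infer_instance

-- ===== CLAIM (what is proved, stated in full; the proofs are below) =====
def Claim_equal_xor_pow : Prop := ∀ (base : Int) (exp : Int), Dom_xor_pow base exp → Pre_xor_pow base exp → Spec_xor_pow base exp (xor_pow base exp)

-- ===== LEMMAS AND PROOFS =====
-- Reference carryless product, recursing on the bits of the FIRST argument.
def cmul (x : Nat) (y : Nat) : Nat :=
  if x = 0 then 0
  else (if x % 2 = 1 then y else 0) ^^^ 2 * cmul (x / 2) y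
decreasing_by omega

theorem xor_div_two (a b : Nat) : (a ^^^ b) / 2 = a / 2 ^^^ b / 2 := by
  apply Nat.eq_of_testBit_eq; intro i
  simp only [Nat.testBit_xor, ← Nat.testBit_add_one]

theorem xor_mod_two (a b : Nat) : (a ^^^ b) % 2 = (a % 2 + b % 2) % 2 := by
  have h := Nat.testBit_xor a b 0
  simp only [Nat.testBit_zero] at h
  rcases Nat.mod_two_eq_zero_or_one a with ha | ha <;>
    rcases Nat.mod_two_eq_zero_or_one b with hb | hb <;>
    simp [ha, hb] at h ⊢ <;> omega

theorem two_mul_xor (a b : Nat) : 2 * a ^^^ 2 * b = 2 * (a ^^^ b) := by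
  have h1 := xor_div_two (2 * a) (2 * b)
  have h2 := xor_mod_two (2 * a) (2 * b)
  simp only [Nat.mul_div_cancel_left _ (by norm_num : 0 < 2), Nat.mul_mod_right] at h1 h2
  omega

theorem two_mul_add_one_xor (a b : Nat) : (2 * a + 1) ^^^ 2 * b = 2 * (a ^^^ b) + 1 := by
  have h1 := xor_div_two (2 * a + 1) (2 * b)
  have h2 := xor_mod_two (2 * a + 1) (2 * b)
  simp only [Nat.mul_div_cancel_left _ (by norm_num : 0 < 2), Nat.mul_mod_right] at h1 h2
  have hh : (2 * a + 1) / 2 = a := by omega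
  rw [hh] at h1
  omega

theorem cmul_zero_left (y : Nat) : cmul 0 y = 0 := by rw [cmul]; simp

theorem cmul_rec (x y : Nat) (hx : x ≠ 0) :
    cmul x y = (if x % 2 = 1 then y else 0) ^^^ 2 * cmul (x / 2) y := by
  rw [cmul]; simp [hx]

-- cmul also satisfies the analogous recursion on the bits of its SECOND argument.
theorem cmul_rec_right (x y : Nat) :
    cmul x y = (if y % 2 = 1 then x else 0) ^^^ 2 * cmul x (y / 2) := by
  induction x using Nat.strong_induction_on generalizing y with
  | _ x ih =>
    by_cases hx : x = 0
    · subst hx; simp [cmul_zero_left]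
    · have hrec : cmul x y = (if x % 2 = 1 then y else 0) ^^^ 2 * cmul (x/2) y := by
        rw [cmul]; simp [hx]
      have hrec2 : cmul x (y/2) = (if x % 2 = 1 then y/2 else 0) ^^^ 2 * cmul (x/2) (y/2) := by
        rw [cmul]; simp [hx]
      rw [hrec, ih (x/2) (by omega) y, hrec2]
      rcases Nat.mod_two_eq_zero_or_one x with hxm | hxm <;>
        rcases Nat.mod_two_eq_zero_or_one y with hym | hym
      · simp [hxm, hym]
      · simp [hxm, hym]
        have hx2 : x = 2 * (x / 2) := by omega
        have h := two_mul_xor (x / 2) (2 * cmul (x / 2) (y / 2))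
        rw [← hx2] at h
        omega
      · simp [hxm, hym]
        have hy2 : y = 2 * (y / 2) := by omega
        have h := two_mul_xor (y / 2) (2 * cmul (x / 2) (y / 2))
        rw [← hy2] at h
        omega
      · simp [hxm, hym]
        have hx2 : x = 2 * (x / 2) + 1 := by omega
        have hy2 : y = 2 * (y / 2) + 1 := by omega
        have h1 := two_mul_add_one_xor (x / 2) (y / 2 ^^^ 2 * cmul (x / 2) (y / 2))
        have h2 := two_mul_add_one_xor (y / 2) (x / 2 ^^^ 2 * cmul (x / 2) (y / 2))
        rw [← hx2] at h1
        rw [← hy2] at h2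
        have h3 : x / 2 ^^^ (y / 2 ^^^ 2 * cmul (x / 2) (y / 2))
            = y / 2 ^^^ (x / 2 ^^^ 2 * cmul (x / 2) (y / 2)) := Nat.xor_left_comm _ _ _
        omega

theorem cmul_zero_right (x : Nat) : cmul x 0 = 0 := by
  induction x using Nat.strong_induction_on with
  | _ x ih =>
    by_cases hx : x = 0
    · subst hx; exact cmul_zero_left 0
    · rw [cmul_rec x 0 hx, ih (x / 2) (by omega)]; simp

theorem cmul_one_left (y : Nat) : cmul 1 y = y := by
  rw [cmul]; simp [cmul_zero_left]

theorem cmul_comm (x y : Nat) : cmul x y = cmul y x := by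
  induction x using Nat.strong_induction_on generalizing y with
  | _ x ih =>
    by_cases hx : x = 0
    · subst hx; rw [cmul_zero_left, cmul_zero_right]
    · rw [cmul_rec x y hx, ih (x / 2) (by omega) y, cmul_rec_right y x]

theorem cmul_one_right (x : Nat) : cmul x 1 = x := by
  rw [cmul_comm]; exact cmul_one_left x

theorem cmul_xor_right (x a b : Nat) : cmul x (a ^^^ b) = cmul x a ^^^ cmul x b := by
  induction x using Nat.strong_induction_on generalizing a b with
  | _ x ih =>
    by_cases hx : x = 0
    · subst hx; simp [cmul_zero_left]
    · rw [cmul_rec x (a ^^^ b) hx, cmul_rec x a hx, cmul_rec x b hx, ih (x / 2) (by omega) a b]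
      rw [← two_mul_xor (cmul (x / 2) a) (cmul (x / 2) b)]
      rcases Nat.mod_two_eq_zero_or_one x with hxm | hxm <;> simp [hxm]
      ac_rfl

theorem cmul_two_mul_right (x y : Nat) : cmul x (2 * y) = 2 * cmul x y := by
  induction x using Nat.strong_induction_on generalizing y with
  | _ x ih =>
    by_cases hx : x = 0
    · subst hx; simp [cmul_zero_left]
    · rw [cmul_rec x (2 * y) hx, cmul_rec x y hx, ih (x / 2) (by omega) y]
      rcases Nat.mod_two_eq_zero_or_one x with hxm | hxm <;> simp [hxm]
      exact two_mul_xor y (2 * cmul (x / 2) y)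

theorem cmul_assoc (x y z : Nat) : cmul (cmul x y) z = cmul x (cmul y z) := by
  induction z using Nat.strong_induction_on generalizing x y with
  | _ z ih =>
    by_cases hz : z = 0
    · subst hz; rw [cmul_zero_right, cmul_zero_right, cmul_zero_right]
    · rw [cmul_rec_right (cmul x y) z, cmul_rec_right y z, ih (z / 2) (by omega) x y,
          cmul_xor_right, cmul_two_mul_right]
      rcases Nat.mod_two_eq_zero_or_one z with hzm | hzm <;> simp [hzm, cmul_zero_right]

theorem shiftLeft_xor (a b s : Nat) : (a ^^^ b) <<< s = a <<< s ^^^ b <<< s := by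
  induction s with
  | zero => simp
  | succ n ih => rw [Nat.shiftLeft_succ, Nat.shiftLeft_succ, Nat.shiftLeft_succ, ih,
                     ← two_mul_xor]

theorem xorProductLoop_eq (y x res shift : Nat) :
    xorProductLoop x y res shift = res ^^^ (cmul x y) <<< shift := by
  induction y using Nat.strong_induction_on generalizing res shift with
  | _ y ih =>
    by_cases hy : y = 0
    · subst hy; rw [xorProductLoop, cmul_zero_right]; simp
    · rw [xorProductLoop, if_neg hy, Nat.shiftRight_one,
          ih (y / 2) (Nat.div_lt_self (by omega) (by omega)) _ _,
          cmul_rec_right x y, Nat.and_one_is_mod]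
      rw [shiftLeft_xor, show (2 * cmul x (y / 2)) <<< shift = (cmul x (y / 2)) <<< (shift + 1) from
            by rw [Nat.shiftLeft_eq, Nat.shiftLeft_eq, pow_succ]; ring]
      rcases Nat.mod_two_eq_zero_or_one y with hym | hym <;> simp [hym]
      exact Nat.xor_assoc _ _ _

theorem xorProductLoop_cmul (x y : Nat) : xorProductLoop x y 0 0 = cmul x y := by
  rw [xorProductLoop_eq]; simp

-- reference power: 1 multiplied by b, n times
def cpow (b : Nat) : Nat → Nat
  | 0 => 1
  | n + 1 => cmul (cpow b n) b

theorem cpow_succ' (b n : Nat) : cpow b (n + 1) = cmul b (cpow b n) := by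
  rw [cpow, cmul_comm]

theorem cpow_two_mul (b k : Nat) : cpow (cmul b b) k = cpow b (2 * k) := by
  induction k with
  | zero => rfl
  | succ n ih =>
      rw [cpow, ih, show 2 * (n + 1) = 2 * n + 1 + 1 from by omega, cpow, cpow, cmul_assoc]

theorem cpow_add (b m n : Nat) : cpow b (m + n) = cmul (cpow b m) (cpow b n) := by
  induction n with
  | zero => rw [cpow, cmul_one_right]; rfl
  | succ k ih => rw [show m + (k + 1) = (m + k) + 1 from rfl, cpow, ih, cpow, cmul_assoc]

theorem cmul_mul_mul (a b c d : Nat) :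
    cmul (cmul a b) (cmul c d) = cmul (cmul a c) (cmul b d) := by
  rw [cmul_assoc, ← cmul_assoc b c d, cmul_comm b c, cmul_assoc c b d, ← cmul_assoc]

theorem cpow_cmul (u v n : Nat) : cpow (cmul u v) n = cmul (cpow u n) (cpow v n) := by
  induction n with
  | zero => exact (cmul_one_right 1).symm
  | succ k ih => rw [cpow, ih, cpow, cpow, cmul_mul_mul]

theorem cpow_one_base (n : Nat) : cpow 1 n = 1 := by
  induction n with
  | zero => rfl
  | succ k ih => rw [cpow, ih, cmul_one_left]

-- value of a most-significant-first bit list (non-1 entries count as 0, as in B's loop)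
def bitsVal : List Nat → Nat
  | [] => 0
  | b :: bs => (if b = 1 then 1 else 0) * 2 ^ bs.length + bitsVal bs

theorem bitsVal_append (xs : List Nat) (d : Nat) :
    bitsVal (xs ++ [d]) = 2 * bitsVal xs + (if d = 1 then 1 else 0) := by
  induction xs with
  | nil => simp [bitsVal]
  | cons b bs ih =>
      simp only [List.cons_append, bitsVal, ih, List.length_append, List.length_cons,
        List.length_nil, pow_succ]
      ring

theorem natBits_val (n : Nat) : bitsVal (natBits n) = n := by
  induction n using Nat.strong_induction_on with
  | _ n ih =>
    by_cases hn : n = 0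
    · subst hn; rw [natBits]; simp [bitsVal]
    · rw [natBits, if_neg hn, bitsVal_append, ih (n / 2) (by omega)]
      rcases Nat.mod_two_eq_zero_or_one n with h | h <;> simp [h] <;> omega

theorem pyBin_val (n : Nat) : bitsVal (pyBin n) = n := by
  by_cases hn : n = 0
  · subst hn; rw [pyBin]; simp [bitsVal]
  · rw [pyBin, if_neg hn, natBits_val]

theorem xorPowAltLoop_eq (b : Nat) (bs : List Nat) :
    ∀ r, xorPowAltLoop b r bs = cmul (cpow r (2 ^ bs.length)) (cpow b (bitsVal bs)) := by
  induction bs with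
  | nil =>
      intro r
      simp [xorPowAltLoop, bitsVal, cpow, cmul_one_right, cmul_one_left]
  | cons bit rest ih =>
      intro r
      rw [xorPowAltLoop, xorProductLoop_cmul r r]
      by_cases hb : bit = 1
      · rw [if_pos hb, xorProductLoop_cmul, ih, cpow_cmul, cpow_two_mul, bitsVal, if_pos hb,
            cmul_assoc, ← cpow_add, List.length_cons, pow_succ]
        rw [show 2 ^ rest.length * 2 = 2 * 2 ^ rest.length from by ring,
            show 1 * 2 ^ rest.length + bitsVal rest = 2 ^ rest.length + bitsVal rest from by ring]
      · rw [if_neg hb, ih, cpow_two_mul, bitsVal, if_neg hb, List.length_cons, pow_succ]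
        rw [show 2 ^ rest.length * 2 = 2 * 2 ^ rest.length from by ring,
            show 0 * 2 ^ rest.length + bitsVal rest = bitsVal rest from by ring]

theorem xorPowLoop_eq (e b r : Nat) : xorPowLoop b e r = cmul r (cpow b e) := by
  induction e using Nat.strong_induction_on generalizing b r with
  | _ e ih =>
    by_cases he : e = 0
    · subst he; rw [xorPowLoop, cpow, cmul_one_right]; rfl
    · rw [xorPowLoop, if_neg he, Nat.shiftRight_one, Nat.and_one_is_mod,
          ih (e / 2) (Nat.div_lt_self (by omega) (by omega)) _ _,
          xorProductLoop_cmul b b, cpow_two_mul]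
      rcases Nat.mod_two_eq_zero_or_one e with hem | hem <;> simp [hem]
      · rw [show 2 * (e / 2) = e from by omega]
      · rw [xorProductLoop_cmul, show 2 * (e / 2) = e - 1 from by omega,
            cmul_assoc, ← cpow_succ' b (e - 1), show e - 1 + 1 = e from by omega]

-- ===== VERDICT (by name: the statement is the Claim_ definition above) =====
theorem xor_pow_spec : Claim_equal_xor_pow := by
  intro base exp _ hpre
  unfold Pre_xor_pow at hpre
  unfold Spec_xor_pow xor_pow xor_pow_alt
  rw [if_neg (by omega : ¬ exp < 0), if_neg (by omega : ¬ exp < 0),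
      xorPowLoop_eq, xorPowAltLoop_eq, cpow_one_base, pyBin_val]
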